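-- pv_equiv track=rewrite | github.com/zetta102/ejFundInf | tp6.py | ejercicio11
-- ===== SOURCE A (Python) =====
-- def ejercicio11(a):
--     # En las funciones, las entradas teóricamente serían los argumentos
--
--     # Proceso
--     c = 0
--     a2 = a
--     while a2 > 0:
--         a2 //= 10
--         c += 1
--     if c % 2 == 0:
--         return -1
--     else:
--         p = 0
--         while a > 0:
--             if (c // 2) == p:
--                 return a % 10
--             a = a // 10
--             p = p + 1
-- ===== SOURCE B (Python) =====
-- def ejercicio11(a):
--     # Build the digit list (least-significant first) in one pass,
--     # then pick the middle digit by a single index.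
--     ds = []
--     while a > 0:
--         ds.append(a % 10)
--         a //= 10
--     if len(ds) % 2 == 0:
--         return -1
--     return ds[len(ds) // 2]
-- ===== Notes on version B (the rewrite author's own statement) =====
-- stated objective: simpler
-- what changed: A counts digits in one division loop and then walks a second division loop to the middle position; B builds the digit list in a single pass and returns its middle element by one index, so the second loop and the position counter disappear.
import Mathlib
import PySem

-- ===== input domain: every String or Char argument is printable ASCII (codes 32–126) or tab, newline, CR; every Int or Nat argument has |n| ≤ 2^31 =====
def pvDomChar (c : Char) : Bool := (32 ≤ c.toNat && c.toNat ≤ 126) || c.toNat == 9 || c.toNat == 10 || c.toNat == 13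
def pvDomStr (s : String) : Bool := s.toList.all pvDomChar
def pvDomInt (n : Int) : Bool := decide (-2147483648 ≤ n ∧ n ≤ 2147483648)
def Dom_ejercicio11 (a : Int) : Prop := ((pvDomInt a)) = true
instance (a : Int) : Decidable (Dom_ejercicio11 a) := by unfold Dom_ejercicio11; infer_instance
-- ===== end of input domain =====

-- B replaces A's two division loops (count digits, then walk to the middle) by one
-- pass that materialises the digit list and a single middle index (objective: simpler).

-- ===== PORT A =====
-- first while loop: c = number of decimal digits of a (0 for a <= 0)
def pvCountA (a2 : Int) (c : Int) : Int :=
  if _h : a2 > 0 then pvCountA (PySem.Int.floordiv a2 10) (c + 1) else c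
termination_by a2.toNat
decreasing_by
  rw [PySem.Int.floordiv_eq_ediv_of_pos (by omega)]
  omega

-- second while loop: strip digits until position p reaches c // 2, then return a % 10;
-- none = Python's fall-through (return None), unreachable when c is odd
def pvLoopA (a : Int) (c : Int) (p : Int) : Option Int :=
  if _h : a > 0 then
    if PySem.Int.floordiv c 2 = p then some (PySem.Int.mod a 10)
    else pvLoopA (PySem.Int.floordiv a 10) c (p + 1)
  else none
termination_by a.toNat
decreasing_by
  rw [PySem.Int.floordiv_eq_ediv_of_pos (by omega)]
  omega

def ejercicio11 (a : Int) : Int :=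
  let c := pvCountA a 0
  if PySem.Int.mod c 2 = 0 then -1
  else (pvLoopA a c 0).getD (-1)  -- none (Python's implicit None) is unreachable here

-- ===== PORT B =====
-- the while loop of Source B: digit list of a, least-significant first (append = cons in recursion order)
def pvDigitsB (a : Int) : List Int :=
  if _h : a > 0 then PySem.Int.mod a 10 :: pvDigitsB (PySem.Int.floordiv a 10) else []
termination_by a.toNat
decreasing_by
  rw [PySem.Int.floordiv_eq_ediv_of_pos (by omega)]
  omega

def ejercicio11_alt (a : Int) : Int :=
  let ds := pvDigitsB a
  if PySem.Int.mod (PySem.List.len ds) 2 = 0 then -1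
  else PySem.List.pyGetD ds (PySem.Int.floordiv (PySem.List.len ds) 2) 0

-- ===== PRECONDITION & SPEC =====
def Spec_ejercicio11 (a : Int) (out : Int) : Prop := out = ejercicio11_alt a
instance (a : Int) (out : Int) : Decidable (Spec_ejercicio11 a out) := by unfold Spec_ejercicio11; infer_instance

-- ===== CLAIM (what is proved, stated in full; the proofs are below) =====
def Claim_equal_ejercicio11 : Prop := ∀ (a : Int), Dom_ejercicio11 a → Spec_ejercicio11 a (ejercicio11 a)

-- ===== LEMMAS AND PROOFS =====

-- A's counter loop computes c plus the number of digits B collects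
theorem pvCountA_eq (a c : Int) : pvCountA a c = c + (pvDigitsB a).length := by
  induction a, c using pvCountA.induct with
  | case1 a c h ih =>
      rw [pvCountA, pvDigitsB, dif_pos h, dif_pos h, ih, List.length_cons]
      push_cast
      ring
  | case2 a c h =>
      rw [pvCountA, pvDigitsB, dif_neg h, dif_neg h]
      simp

-- A's second loop returns the digit at offset (c//2 - p) of B's digit list
theorem pvLoopA_eq (a c p : Int)
    (hp : p ≤ PySem.Int.floordiv c 2)
    (hlt : (PySem.Int.floordiv c 2 - p).toNat < (pvDigitsB a).length) :
    pvLoopA a c p = some ((pvDigitsB a).getD (PySem.Int.floordiv c 2 - p).toNat 0) := by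
  induction a, p using pvLoopA.induct c with
  | case1 a h =>
      rw [pvLoopA, pvDigitsB, dif_pos h]
      simp [h]
  | case2 a p h hne ih =>
      rw [pvDigitsB, dif_pos h] at hlt ⊢
      rw [List.length_cons] at hlt
      rw [pvLoopA, dif_pos h, if_neg hne]
      have hp' : p + 1 ≤ PySem.Int.floordiv c 2 := by omega
      rw [ih hp' (by omega)]
      have hidx : (PySem.Int.floordiv c 2 - p).toNat
          = (PySem.Int.floordiv c 2 - (p + 1)).toNat + 1 := by omega
      rw [hidx]
      simp
  | case3 a p h =>
      rw [pvDigitsB, dif_neg h] at hlt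
      simp at hlt

-- ===== VERDICT (by name: the statement is the Claim_ definition above) =====
theorem ejercicio11_spec : Claim_equal_ejercicio11 := by
  intro a _
  unfold Spec_ejercicio11 ejercicio11 ejercicio11_alt
  have hc : pvCountA a 0 = ((pvDigitsB a).length : Int) := by rw [pvCountA_eq]; omega
  have hmod : PySem.Int.mod ((pvDigitsB a).length : Int) 2
      = (((pvDigitsB a).length % 2 : Nat) : Int) := PySem.Int.mod_natCast _ 2
  have hdiv : PySem.Int.floordiv ((pvDigitsB a).length : Int) 2
      = (((pvDigitsB a).length / 2 : Nat) : Int) := PySem.Int.floordiv_natCast _ 2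
  rw [hc]
  simp only [PySem.List.len_eq]
  by_cases hpar : PySem.Int.mod (((pvDigitsB a).length : Nat) : Int) 2 = 0
  · rw [if_pos hpar, if_pos hpar]
  · rw [if_neg hpar, if_neg hpar]
    have hodd : (pvDigitsB a).length % 2 = 1 := by rw [hmod] at hpar; omega
    rw [pvLoopA_eq a _ 0 (by rw [hdiv]; omega) (by rw [hdiv]; omega)]
    rw [hdiv]
    simp only [sub_zero, Option.getD_some, Int.toNat_natCast, PySem.List.pyGetD_natCast]
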